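-- pv_equiv track=rewrite | github.com/freshcoconut/Python-Lernen | 大三下-数据与文本挖掘-机器学习作业/任务二/code/house_description.py | assign_name
-- ===== SOURCE A (Python) =====
-- def assign_name(arr):
--     name = []
--     x = []
--     for e in arr:
--         if e in name:
--             e_index = name.index(e)
--             x.append(e_index)
--         else:
--             name.append(e)
--             x.append( len(name) - 1 )
--     return name, x
-- ===== SOURCE B (Python) =====
-- def assign_name(arr):
--     # Non-incremental characterization: mark first occurrences, then the code of e
--     # is (number of first occurrences up to e's first position) - 1.
--     firsts = [e not in arr[:j] for j, e in enumerate(arr)]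
--     name = [e for e, f in zip(arr, firsts) if f]
--     x = [sum(firsts[:arr.index(e) + 1]) - 1 for e in arr]
--     return name, x
-- ===== Notes on version B (the rewrite author's own statement) =====
-- stated objective: alternative
-- what changed: Replaces A's fused loop that incrementally accumulates the name list and the code list (with a list membership test and list.index inside the loop) by a non-incremental counting characterization: a first-occurrence boolean mask over arr, name as a filter of arr by that mask, and each code computed as the count of first occurrences up to the element's first position minus one.
import Mathlib
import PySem

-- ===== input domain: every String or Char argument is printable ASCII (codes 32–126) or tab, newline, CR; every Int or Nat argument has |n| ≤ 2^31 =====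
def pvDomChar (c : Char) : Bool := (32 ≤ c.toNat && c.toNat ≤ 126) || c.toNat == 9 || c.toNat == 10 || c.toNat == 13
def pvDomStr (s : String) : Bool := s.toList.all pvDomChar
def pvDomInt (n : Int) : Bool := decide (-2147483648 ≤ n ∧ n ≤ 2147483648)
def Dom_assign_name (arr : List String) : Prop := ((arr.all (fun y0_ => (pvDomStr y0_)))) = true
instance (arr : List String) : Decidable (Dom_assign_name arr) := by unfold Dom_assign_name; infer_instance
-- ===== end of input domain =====

-- B replaces A's fused accumulate-name-and-index loop with a non-incremental characterization:
-- a first-occurrence mask, name as a filter of the mask, and each code as a count of first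
-- occurrences up to the element's first position (alternative decomposition, not faster).

-- ===== PORT A =====
-- for e in arr: if e in name: x.append(name.index(e)) else: name.append(e); x.append(len(name)-1)
def assign_name (arr : List String) : List String × List Int :=
  arr.foldl (fun s e =>
    if e ∈ s.1 then
      (s.1, s.2 ++ [(((PySem.List.index? s.1 e).getD 0 : Nat) : Int)])
    else
      let name' := s.1 ++ [e]
      (name', s.2 ++ [(name'.length : Int) - 1]))
    ([], [])

-- ===== PORT B =====
-- firsts = [e not in arr[:j] for j, e in enumerate(arr)]
-- name = [e for e, f in zip(arr, firsts) if f]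
-- x = [sum(firsts[:arr.index(e) + 1]) - 1 for e in arr]
def assign_name_alt (arr : List String) : List String × List Int :=
  let firsts := (PySem.List.enumerate arr).map
    (fun je => !(PySem.List.slice arr (some 0) (some je.1)).contains je.2)
  let name := ((arr.zip firsts).filter (fun p => p.2)).map (fun p => p.1)
  -- arr.index(e): e is drawn from arr, so index? is always some; getD 0 is exact here
  let x := arr.map (fun e =>
    (((PySem.List.slice firsts (some 0)
        (some ((((PySem.List.index? arr e).getD 0 : Nat) : Int) + 1))).countP (fun b => b) : Nat) : Int) - 1)
  (name, x)

-- ===== PRECONDITION & SPEC =====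
def Spec_assign_name (arr : List String) (out : List String × List Int) : Prop := out = assign_name_alt arr
instance (arr : List String) (out : List String × List Int) : Decidable (Spec_assign_name arr out) := by unfold Spec_assign_name; infer_instance

-- ===== CLAIM (what is proved, stated in full; the proofs are below) =====
def Claim_equal_assign_name : Prop := ∀ (arr : List String), Dom_assign_name arr → Spec_assign_name arr (assign_name arr)

-- ===== LEMMAS AND PROOFS =====

-- reference form of B's first-occurrence mask of t, relative to an already-seen prefix p
def pvFirsts : List String → List String → List Bool
  | _, [] => []
  | p, a :: t => (!p.contains a) :: pvFirsts (p ++ [a]) t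

theorem pvFirsts_congr (t p q : List String) (h : ∀ x, x ∈ p ↔ x ∈ q) :
    pvFirsts p t = pvFirsts q t := by
  induction t generalizing p q with
  | nil => rfl
  | cons a t ih =>
    show (!p.contains a) :: pvFirsts (p ++ [a]) t = (!q.contains a) :: pvFirsts (q ++ [a]) t
    have hc : p.contains a = q.contains a := by
      by_cases hx : a ∈ p
      · simp [hx, (h a).mp hx]
      · have hq : a ∉ q := fun hy => hx ((h a).mpr hy)
        simp [hx, hq]
    rw [hc, ih (p ++ [a]) (q ++ [a]) (by intro x; simp [h x])]

theorem pvFirsts_length (t p : List String) : (pvFirsts p t).length = t.length := by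
  induction t generalizing p with
  | nil => rfl
  | cons a t ih => simp [pvFirsts, ih]

theorem pvFirsts_append (t u p : List String) :
    pvFirsts p (t ++ u) = pvFirsts p t ++ pvFirsts (p ++ t) u := by
  induction t generalizing p with
  | nil => simp [pvFirsts]
  | cons a t ih => simp [pvFirsts, ih, List.append_assoc]

-- B's mask comprehension computes pvFirsts
theorem pv_firsts_eq (t p : List String) :
    (PySem.List.enumerate t (p.length : Int)).map
      (fun je => !(PySem.List.slice (p ++ t) (some 0) (some je.1)).contains je.2) = pvFirsts p t := by
  induction t generalizing p with
  | nil => simp [PySem.List.enumerate_nil, pvFirsts]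
  | cons a t ih =>
    rw [PySem.List.enumerate_cons, List.map_cons]
    simp only [pvFirsts]
    congr 1
    · rw [PySem.List.slice_zero_start, PySem.List.slice_to_natCast]
      simp
    · have h1 : (p.length : Int) + 1 = (((p ++ [a]).length : Nat) : Int) := by simp
      have h2 : p ++ a :: t = (p ++ [a]) ++ t := by simp
      simp only [h1, h2]
      exact ih (p ++ [a])

-- updating a set only appends
theorem pv_update_prefix (t : List String) (p : PySem.Set String) :
    ∃ r, PySem.Set.update p t = p ++ r := by
  induction t generalizing p with
  | nil => exact ⟨[], by simp [PySem.Set.update_nil]⟩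
  | cons a t ih =>
    rw [PySem.Set.update_cons]
    by_cases h : a ∈ p
    · rw [PySem.Set.add_of_mem h]; exact ih p
    · rw [PySem.Set.add_of_not_mem h]
      obtain ⟨r, hr⟩ := ih (p ++ [a])
      exact ⟨[a] ++ r, by simp [hr]⟩

-- A's loop computes (Set.update name arr, codes relative to the final name)
theorem pv_A (l : List String) (name : List String) (x : List Int) :
    l.foldl (fun s e =>
      if e ∈ s.1 then
        (s.1, s.2 ++ [(((PySem.List.index? s.1 e).getD 0 : Nat) : Int)])
      else
        let name' := s.1 ++ [e]
        (name', s.2 ++ [(name'.length : Int) - 1])) (name, x)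
    = (PySem.Set.update name l,
       x ++ l.map (fun e => (((PySem.List.index? (PySem.Set.update name l) e).getD 0 : Nat) : Int))) := by
  induction l generalizing name x with
  | nil => simp [PySem.Set.update_nil]
  | cons a t ih =>
    rw [PySem.Set.update_cons]
    by_cases hmem : a ∈ name
    · rw [PySem.Set.add_of_mem hmem]
      simp only [List.foldl_cons, if_pos hmem]
      rw [ih name _]
      obtain ⟨r, hr⟩ := pv_update_prefix t name
      have hgd : (PySem.List.index? (PySem.Set.update name t) a).getD 0
          = (PySem.List.index? name a).getD 0 := by
        rw [hr, PySem.List.index?_append_of_mem r hmem]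
      simp only [List.map_cons, List.append_assoc, List.singleton_append, hgd]
    · rw [PySem.Set.add_of_not_mem hmem]
      simp only [List.foldl_cons, if_neg hmem]
      rw [ih (name ++ [a]) _]
      obtain ⟨r, hr⟩ := pv_update_prefix t (name ++ [a])
      have hidx : PySem.List.index? (PySem.Set.update (name ++ [a]) t) a = some name.length := by
        rw [hr, PySem.List.index?_append_of_mem r (by simp : a ∈ name ++ [a])]
        exact PySem.List.index?_append_singleton_self name a hmem
      have hgd : (((PySem.List.index? (PySem.Set.update (name ++ [a]) t) a).getD 0 : Nat) : Int)
          = ((name ++ [a]).length : Int) - 1 := by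
        rw [hidx]; simp
      simp only [List.map_cons, List.append_assoc, List.singleton_append, hgd]

-- B's name component equals Set.update
theorem pv_B_name (t p : List String) :
    p ++ ((t.zip (pvFirsts p t)).filter (fun q => q.2)).map (fun q => q.1)
      = PySem.Set.update p t := by
  induction t generalizing p with
  | nil => simp [pvFirsts, PySem.Set.update_nil]
  | cons a t ih =>
    rw [PySem.Set.update_cons]
    simp only [pvFirsts, List.zip_cons_cons, List.filter_cons]
    by_cases h : a ∈ p
    · have hc : p.contains a = true := by simp [h]
      have hfr : pvFirsts (p ++ [a]) t = pvFirsts p t := by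
        apply pvFirsts_congr; intro x; constructor
        · intro hx; rcases List.mem_append.mp hx with hx | hx
          · exact hx
          · simpa [List.mem_singleton.mp hx] using h
        · intro hx; exact List.mem_append.mpr (Or.inl hx)
      rw [PySem.Set.add_of_mem h]
      simp only [hc, Bool.not_true]
      rw [hfr]
      simpa using ih p
    · have hc : p.contains a = false := by simp [h]
      rw [PySem.Set.add_of_not_mem h]
      simp only [hc, Bool.not_false]
      rw [← ih (p ++ [a])]
      simp

-- count of trues in the mask = growth of the seen set
theorem pv_count_firsts (t p : List String) :
    p.length + (pvFirsts p t).countP (fun b => b) = (PySem.Set.update p t).length := by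
  induction t generalizing p with
  | nil => simp [pvFirsts, PySem.Set.update_nil]
  | cons a t ih =>
    rw [PySem.Set.update_cons]
    simp only [pvFirsts, List.countP_cons]
    by_cases h : a ∈ p
    · have hc : p.contains a = true := by simp [h]
      have hfr : pvFirsts (p ++ [a]) t = pvFirsts p t := by
        apply pvFirsts_congr; intro x; constructor
        · intro hx; rcases List.mem_append.mp hx with hx | hx
          · exact hx
          · simpa [List.mem_singleton.mp hx] using h
        · intro hx; exact List.mem_append.mpr (Or.inl hx)
      rw [PySem.Set.add_of_mem h]
      simp only [hc, Bool.not_true]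
      rw [hfr] at *
      simpa using ih p
    · have hc : p.contains a = false := by simp [h]
      rw [PySem.Set.add_of_not_mem h]
      have h2 := ih (p ++ [a])
      simp only [List.length_append, List.length_singleton] at h2
      simp [h]
      omega

-- the code B computes for e ∈ arr is e's index in the deduplicated name list
theorem pv_rank (arr : List String) (e : String) (k : Nat)
    (hk : PySem.List.index? arr e = some k) :
    ((((pvFirsts [] arr).take (k + 1)).countP (fun b => b) : Nat) : Int) - 1
      = (((PySem.List.index? (PySem.Set.ofList arr) e).getD 0 : Nat) : Int) := by
  obtain ⟨pre, suf, harr, hlen, hpre⟩ := (PySem.List.index?_eq_some_iff arr e k).mp hk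
  have harr2 : arr = (pre ++ [e]) ++ suf := by simp [harr]
  have hmask : (pvFirsts [] arr).take (k + 1) = pvFirsts [] (pre ++ [e]) := by
    rw [harr2, pvFirsts_append]
    have : (pvFirsts [] (pre ++ [e])).length = k + 1 := by
      rw [pvFirsts_length]; simp [hlen]
    rw [List.take_left' this]
  have hofl : PySem.Set.ofList (pre ++ [e]) = PySem.Set.ofList pre ++ [e] := by
    rw [PySem.Set.ofList_append_singleton,
      PySem.Set.add_of_not_mem (fun hx => hpre ((PySem.Set.mem_ofList pre e).mp hx))]
  have hcount : (pvFirsts [] (pre ++ [e])).countP (fun b => b)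
      = (PySem.Set.ofList pre).length + 1 := by
    have := pv_count_firsts (pre ++ [e]) []
    simp only [List.length_nil, Nat.zero_add] at this
    rw [this]
    show (PySem.Set.update [] (pre ++ [e])).length = _
    have : PySem.Set.update [] (pre ++ [e]) = PySem.Set.ofList (pre ++ [e]) := rfl
    rw [this, hofl]; simp
  have hidx : PySem.List.index? (PySem.Set.ofList arr) e = some (PySem.Set.ofList pre).length := by
    rw [harr2, PySem.Set.ofList_append]
    obtain ⟨r, hr⟩ := pv_update_prefix suf (PySem.Set.ofList (pre ++ [e]))
    rw [hr, hofl, List.append_assoc]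
    have h1 : PySem.List.index? (PySem.Set.ofList pre ++ ([e] ++ r)) e
        = PySem.List.index? (PySem.Set.ofList pre ++ [e] ++ r) e := by
      rw [List.append_assoc]
    rw [h1, PySem.List.index?_append_of_mem r (by simp : e ∈ PySem.Set.ofList pre ++ [e])]
    exact PySem.List.index?_append_singleton_self (PySem.Set.ofList pre) e
      (fun hx => hpre ((PySem.Set.mem_ofList pre e).mp hx))
  rw [hmask, hcount, hidx]
  simp

-- ===== VERDICT (by name: the statement is the Claim_ definition above) =====
theorem assign_name_spec : Claim_equal_assign_name := by
  intro arr _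
  show assign_name arr = assign_name_alt arr
  unfold assign_name assign_name_alt
  rw [pv_A arr [] []]
  have hupd : PySem.Set.update [] arr = PySem.Set.ofList arr := rfl
  have hfirsts : (PySem.List.enumerate arr).map
      (fun je => !(PySem.List.slice arr (some 0) (some je.1)).contains je.2) = pvFirsts [] arr := by
    have := pv_firsts_eq arr []
    simpa using this
  rw [hupd, hfirsts]
  refine Prod.ext ?_ ?_
  · simpa using (pv_B_name arr []).symm
  · simp only [List.nil_append]
    apply List.map_congr_left
    intro e he
    obtain ⟨k, hk⟩ := Option.isSome_iff_exists.mp ((PySem.List.index?_isSome_iff arr e).mpr he)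
    have hslice : PySem.List.slice (pvFirsts [] arr) (some 0)
        (some ((((PySem.List.index? arr e).getD 0 : Nat) : Int) + 1)) = (pvFirsts [] arr).take (k + 1) := by
      rw [hk, PySem.List.slice_zero_start]
      have : ((k : Nat) : Int) + 1 = (((k + 1 : Nat)) : Int) := by push_cast; ring
      simp only [Option.getD_some, this, PySem.List.slice_to_natCast]
    rw [hslice]
    exact (pv_rank arr e k hk).symm
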